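-- pv_equiv track=rewrite | github.com/ouatu-ro/hall-of-mirrors-3 | solvr.py copy.py | steps_to_exit
-- ===== SOURCE A (Python) =====
-- N = 10
--
-- def in_bounds(r, c):
--     return 0 <= r < N and 0 <= c < N
--
-- def steps_to_exit(r, c, dr, dc):
--     """
--     Count how many steps the beam takes inside the grid (starting from position (r, c) which may be outside),
--     plus one final step that takes it out.
--     """
--     steps = 0
--     nr, nc = r + dr, c + dc
--     if not in_bounds(nr, nc):
--         return 1
--     while in_bounds(nr, nc):
--         steps += 1
--         r, c = nr, nc
--         nr, nc = r + dr, c + dc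
--     return steps + 1
-- ===== SOURCE B (Python) =====
-- N = 10
--
-- def _axis_max(x, d):
--     # largest k >= 1 with 0 <= x + k*d <= N-1, assuming 0 <= x+d <= N-1; None if d == 0 (unbounded)
--     if d > 0:
--         return (N - 1 - x) // d
--     if d < 0:
--         return x // (-d)
--     return None
--
-- def steps_to_exit(r, c, dr, dc):
--     if not (0 <= r + dr < N and 0 <= c + dc < N):
--         return 1
--     kr = _axis_max(r, dr)
--     kc = _axis_max(c, dc)
--     if kr is None:
--         k = kc
--     elif kc is None:
--         k = kr
--     else:
--         k = min(kr, kc)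
--     return k + 1
-- ===== Notes on version B (the rewrite author's own statement) =====
-- stated objective: alternative
-- what changed: Replaces the step-by-step while loop with a closed-form per-axis floor-division computation of the number of in-bounds steps (min over the two axes), returning that count plus one.
import Mathlib
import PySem

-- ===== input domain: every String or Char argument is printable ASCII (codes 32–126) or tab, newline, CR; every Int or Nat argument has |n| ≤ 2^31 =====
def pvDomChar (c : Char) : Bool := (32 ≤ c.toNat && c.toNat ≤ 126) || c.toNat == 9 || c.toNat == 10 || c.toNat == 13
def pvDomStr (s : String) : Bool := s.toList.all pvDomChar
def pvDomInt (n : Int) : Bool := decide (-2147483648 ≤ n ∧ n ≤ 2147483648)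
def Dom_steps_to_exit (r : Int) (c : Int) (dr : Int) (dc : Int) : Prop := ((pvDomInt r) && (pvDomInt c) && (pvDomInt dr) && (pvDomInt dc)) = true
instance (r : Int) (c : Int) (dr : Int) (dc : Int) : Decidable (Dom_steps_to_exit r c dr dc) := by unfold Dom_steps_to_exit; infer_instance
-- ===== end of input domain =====

-- B computes the step count in closed form (per-axis floor division) instead of A's cell-by-cell loop.
-- Pre_ excludes dr = dc = 0 with (r, c) inside the grid, where A's while loop never terminates.


-- ===== PORT A =====
-- helper in_bounds(r, c)
def in_bounds (r : Int) (c : Int) : Bool :=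
  decide (0 ≤ r ∧ r < 10) && decide (0 ≤ c ∧ c < 10)

-- the while loop of A; fuel only makes the recursion total: on every input admitted by
-- Pre_ the loop runs at most 10 times, so fuel 16 is never exhausted there.
def stepsLoop (fuel : Nat) (steps : Int) (r : Int) (c : Int) (dr : Int) (dc : Int) : Int :=
  match fuel with
  | 0 => steps + 1
  | fuel + 1 =>
    let nr := r + dr
    let nc := c + dc
    if in_bounds nr nc then stepsLoop fuel (steps + 1) nr nc dr dc
    else steps + 1

def steps_to_exit (r : Int) (c : Int) (dr : Int) (dc : Int) : Int :=
  let nr := r + dr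
  let nc := c + dc
  if !(in_bounds nr nc) then 1
  else stepsLoop 16 0 r c dr dc

-- ===== PORT B =====
-- helper _axis_max(x, d): largest k ≥ 1 with 0 ≤ x + k*d ≤ 9 (none = unbounded, d = 0)
def axis_max (x : Int) (d : Int) : Option Int :=
  if 0 < d then some (PySem.Int.floordiv (9 - x) d)
  else if d < 0 then some (PySem.Int.floordiv x (-d))
  else none

def steps_to_exit_alt (r : Int) (c : Int) (dr : Int) (dc : Int) : Int :=
  if !(decide (0 ≤ r + dr ∧ r + dr < 10) && decide (0 ≤ c + dc ∧ c + dc < 10)) then 1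
  else
    match axis_max r dr, axis_max c dc with
    | none,   some kc => kc + 1
    | some kr, none   => kr + 1
    | some kr, some kc => min kr kc + 1
    | none,   none    => 1   -- Python B raises TypeError here (dr = dc = 0); outside Pre_

-- ===== PRECONDITION & SPEC =====
-- Pre_ excludes exactly dr = dc = 0 with (r, c) in bounds: there A's while loop never
-- returns (it loops forever), so there is no value of A to match.
def Pre_steps_to_exit (r : Int) (c : Int) (dr : Int) (dc : Int) : Prop :=
  ¬ (dr = 0 ∧ dc = 0 ∧ 0 ≤ r ∧ r < 10 ∧ 0 ≤ c ∧ c < 10)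
instance (r : Int) (c : Int) (dr : Int) (dc : Int) : Decidable (Pre_steps_to_exit r c dr dc) := by unfold Pre_steps_to_exit; infer_instance

def pvWitness_steps_to_exit : Int × Int × Int × Int := (0, 3, 1, 1)

def Spec_steps_to_exit (r : Int) (c : Int) (dr : Int) (dc : Int) (out : Int) : Prop := out = steps_to_exit_alt r c dr dc
instance (r : Int) (c : Int) (dr : Int) (dc : Int) (out : Int) : Decidable (Spec_steps_to_exit r c dr dc out) := by unfold Spec_steps_to_exit; infer_instance

-- ===== CLAIM (what is proved, stated in full; the proofs are below) =====
def Claim_equal_steps_to_exit : Prop := ∀ (r : Int) (c : Int) (dr : Int) (dc : Int), Dom_steps_to_exit r c dr dc → Pre_steps_to_exit r c dr dc → Spec_steps_to_exit r c dr dc (steps_to_exit r c dr dc)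

-- ===== LEMMAS AND PROOFS =====

-- combined closed-form count (value of B's match once the guard has passed)
def M (r : Int) (c : Int) (dr : Int) (dc : Int) : Int :=
  match axis_max r dr, axis_max c dc with
  | none,    some kc => kc
  | some kr, none    => kr
  | some kr, some kc => min kr kc
  | none,    none    => 0

theorem axis_max_zero (x : Int) : axis_max x 0 = none := by simp [axis_max]

theorem axis_max_some (x d : Int) (hd : d ≠ 0) : ∃ q, axis_max x d = some q := by
  by_cases hpos : 0 < d
  · exact ⟨_, by unfold axis_max; rw [if_pos hpos]⟩
  · exact ⟨_, by unfold axis_max; rw [if_neg hpos, if_pos (by omega : d < 0)]⟩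

-- shifting the start one step changes the axis bound by one (pure division identity)
theorem axis_max_shift (x d : Int) (hd : d ≠ 0) :
    axis_max (x + d) d = (axis_max x d).map (· - 1) := by
  by_cases hpos : 0 < d
  · simp only [axis_max, if_pos hpos, Option.map_some,
      PySem.Int.floordiv_eq_ediv_of_pos hpos]
    rw [show 9 - (x + d) = (9 - x) + (-1) * d by ring,
        Int.add_mul_ediv_right _ _ (by omega : d ≠ 0)]
    simp [Int.sub_eq_add_neg]
  · have hneg : d < 0 := by omega
    simp only [axis_max, if_neg hpos, if_pos hneg, Option.map_some,
      PySem.Int.floordiv_eq_ediv_of_pos (by omega : (0:Int) < -d)]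
    rw [show x + d = x + (-1) * (-d) by ring,
        Int.add_mul_ediv_right _ _ (by omega : (-d) ≠ 0)]
    simp [Int.sub_eq_add_neg]

-- bounds on the axis value when the first step stays in range
theorem axis_max_bounds (x d : Int) (hd : d ≠ 0) (h0 : 0 ≤ x + d) (h9 : x + d ≤ 9) :
    ∃ q, axis_max x d = some q ∧ 1 ≤ q ∧ q ≤ 10 := by
  by_cases hpos : 0 < d
  · refine ⟨PySem.Int.floordiv (9 - x) d, by unfold axis_max; rw [if_pos hpos], ?_, ?_⟩ <;>
      rw [PySem.Int.floordiv_eq_ediv_of_pos hpos]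
    · exact Int.le_ediv_iff_mul_le (by omega) |>.mpr (by omega)
    · calc (9 - x) / d ≤ (9 + 1 * d) / d := Int.ediv_le_ediv hpos (by omega)
        _ = 9 / d + 1 := Int.add_mul_ediv_right _ _ (by omega)
        _ ≤ 9 + 1 := by have := Int.ediv_le_self d (by norm_num : (0:Int) ≤ 9); omega
        _ ≤ 10 := by omega
  · have hneg : d < 0 := by omega
    refine ⟨PySem.Int.floordiv x (-d), by unfold axis_max; rw [if_neg hpos, if_pos hneg], ?_, ?_⟩ <;>
      rw [PySem.Int.floordiv_eq_ediv_of_pos (by omega : (0:Int) < -d)]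
    · exact Int.le_ediv_iff_mul_le (by omega) |>.mpr (by omega)
    · calc x / (-d) ≤ (9 + 1 * (-d)) / (-d) := Int.ediv_le_ediv (by omega) (by omega)
        _ = 9 / (-d) + 1 := Int.add_mul_ediv_right _ _ (by omega)
        _ ≤ 9 + 1 := by have := Int.ediv_le_self (-d) (by norm_num : (0:Int) ≤ 9); omega
        _ ≤ 10 := by omega

-- when the second step leaves the range on this axis, the axis value is exactly 1
theorem axis_max_stop (x d : Int) (hd : d ≠ 0) (h0 : 0 ≤ x + d) (h9 : x + d ≤ 9)
    (hout : ¬ (0 ≤ x + 2 * d ∧ x + 2 * d ≤ 9)) : axis_max x d = some 1 := by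
  by_cases hpos : 0 < d
  · have h1 : 9 < x + 2 * d := by omega
    have hv : (9 - x) / d = 1 := by
      rw [show 9 - x = (9 - x - d) + 1 * d by ring,
          Int.add_mul_ediv_right _ _ (by omega : d ≠ 0),
          Int.ediv_eq_zero_of_lt (by omega) (by omega)]
      norm_num
    unfold axis_max
    rw [if_pos hpos, PySem.Int.floordiv_eq_ediv_of_pos hpos, hv]
  · have hneg : d < 0 := by omega
    have h1 : x + 2 * d < 0 := by omega
    have hv : x / (-d) = 1 := by
      rw [show x = (x + d) + 1 * (-d) by ring,
          Int.add_mul_ediv_right _ _ (by omega : (-d) ≠ 0),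
          Int.ediv_eq_zero_of_lt (by omega) (by omega)]
      norm_num
    unfold axis_max
    rw [if_neg hpos, if_pos hneg, PySem.Int.floordiv_eq_ediv_of_pos (by omega : (0:Int) < -d), hv]

theorem M_bounds (r c dr dc : Int) (hne : ¬ (dr = 0 ∧ dc = 0))
    (hin : in_bounds (r + dr) (c + dc) = true) :
    1 ≤ M r c dr dc ∧ M r c dr dc ≤ 10 := by
  have hin' : 0 ≤ r + dr ∧ r + dr ≤ 9 ∧ 0 ≤ c + dc ∧ c + dc ≤ 9 := by
    simp [in_bounds] at hin; omega
  unfold M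
  by_cases hr : dr = 0
  · have hc : dc ≠ 0 := by tauto
    obtain ⟨q, hq, h1, h9⟩ := axis_max_bounds c dc hc hin'.2.2.1 hin'.2.2.2
    subst hr; rw [axis_max_zero, hq]; exact ⟨h1, h9⟩
  · obtain ⟨q, hq, h1, h9⟩ := axis_max_bounds r dr hr hin'.1 hin'.2.1
    by_cases hc : dc = 0
    · subst hc; rw [axis_max_zero, hq]; exact ⟨h1, h9⟩
    · obtain ⟨q', hq', h1', h9'⟩ := axis_max_bounds c dc hc hin'.2.2.1 hin'.2.2.2
      rw [hq, hq']; constructor <;> simp [min_def] <;> omega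

theorem M_shift (r c dr dc : Int) (hne : ¬ (dr = 0 ∧ dc = 0)) :
    M (r + dr) (c + dc) dr dc = M r c dr dc - 1 := by
  unfold M
  by_cases hr : dr = 0
  · have hc : dc ≠ 0 := by tauto
    obtain ⟨q, hq⟩ := axis_max_some c dc hc
    subst hr
    rw [axis_max_shift c dc hc, hq, axis_max_zero, axis_max_zero]
    simp
  · obtain ⟨q, hq⟩ := axis_max_some r dr hr
    by_cases hc : dc = 0
    · subst hc
      rw [axis_max_shift r dr hr, hq, axis_max_zero, axis_max_zero]
      simp
    · obtain ⟨q', hq'⟩ := axis_max_some c dc hc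
      rw [axis_max_shift r dr hr, axis_max_shift c dc hc, hq, hq']
      simp [min_def]; split_ifs <;> omega

theorem M_stop (r c dr dc : Int) (hne : ¬ (dr = 0 ∧ dc = 0))
    (hin : in_bounds (r + dr) (c + dc) = true)
    (hout : in_bounds (r + dr + dr) (c + dc + dc) = false) :
    M r c dr dc = 1 := by
  have hin' : 0 ≤ r + dr ∧ r + dr ≤ 9 ∧ 0 ≤ c + dc ∧ c + dc ≤ 9 := by
    simp [in_bounds] at hin; omega
  have hout' : ¬ (0 ≤ r + 2 * dr ∧ r + 2 * dr ≤ 9) ∨ ¬ (0 ≤ c + 2 * dc ∧ c + 2 * dc ≤ 9) := by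
    simp [in_bounds] at hout; omega
  unfold M
  rcases hout' with hO | hO
  · have hr : dr ≠ 0 := by omega
    have h1 := axis_max_stop r dr hr hin'.1 hin'.2.1 hO
    by_cases hc : dc = 0
    · subst hc; rw [axis_max_zero, h1]
    · obtain ⟨q', hq', h1', _⟩ := axis_max_bounds c dc hc hin'.2.2.1 hin'.2.2.2
      rw [h1, hq']; simp [min_def]; omega
  · have hc : dc ≠ 0 := by omega
    have h1 := axis_max_stop c dc hc hin'.2.2.1 hin'.2.2.2 hO
    by_cases hr : dr = 0
    · subst hr; rw [axis_max_zero, h1]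
    · obtain ⟨q, hq, h1', _⟩ := axis_max_bounds r dr hr hin'.1 hin'.2.1
      rw [h1, hq]; simp [min_def]; omega

theorem stepsLoop_eq (fuel : Nat) : ∀ (steps r c dr dc : Int), ¬ (dr = 0 ∧ dc = 0) →
    in_bounds (r + dr) (c + dc) = true → (M r c dr dc).toNat < fuel →
    stepsLoop fuel steps r c dr dc = steps + M r c dr dc + 1 := by
  induction fuel with
  | zero => intro _ _ _ _ _ _ _ h; omega
  | succ fuel ih =>
    intro steps r c dr dc hne hin hfuel
    have hM := M_bounds r c dr dc hne hin
    rw [stepsLoop]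
    simp only [hin, if_true]
    cases hin2 : in_bounds (r + dr + dr) (c + dc + dc) with
    | true =>
      have hsh := M_shift r c dr dc hne
      rw [ih (steps + 1) (r + dr) (c + dc) dr dc hne hin2 (by omega)]
      omega
    | false =>
      have hst := M_stop r c dr dc hne hin hin2
      cases fuel with
      | zero => omega
      | succ fuel =>
        rw [stepsLoop]
        simp [hin2]
        omega

theorem main_eq (r c dr dc : Int) (hpre : Pre_steps_to_exit r c dr dc) :
    steps_to_exit r c dr dc = steps_to_exit_alt r c dr dc := by
  have hg : (decide (0 ≤ r + dr ∧ r + dr < 10) && decide (0 ≤ c + dc ∧ c + dc < 10)) = in_bounds (r + dr) (c + dc) := rfl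
  simp only [steps_to_exit, steps_to_exit_alt]
  rw [hg]
  cases hin : in_bounds (r + dr) (c + dc) with
  | false => simp
  | true =>
    simp only [Bool.not_true, Bool.false_eq_true, if_false]
    have hin' : 0 ≤ r + dr ∧ r + dr ≤ 9 ∧ 0 ≤ c + dc ∧ c + dc ≤ 9 := by
      simp [in_bounds] at hin; omega
    have hne : ¬ (dr = 0 ∧ dc = 0) := by
      intro ⟨h1, h2⟩
      exact hpre ⟨h1, h2, by omega, by omega, by omega, by omega⟩
    rw [stepsLoop_eq 16 0 r c dr dc hne hin (by have := M_bounds r c dr dc hne hin; omega)]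
    have hMdef : (0 : Int) + M r c dr dc + 1 = M r c dr dc + 1 := by ring
    rw [hMdef]
    unfold M
    by_cases hr : dr = 0
    · have hc : dc ≠ 0 := by tauto
      obtain ⟨q, hq⟩ := axis_max_some c dc hc
      subst hr; rw [axis_max_zero, hq]
    · obtain ⟨q, hq⟩ := axis_max_some r dr hr
      by_cases hc : dc = 0
      · subst hc; rw [axis_max_zero, hq]
      · obtain ⟨q', hq'⟩ := axis_max_some c dc hc
        rw [hq, hq']

-- ===== VERDICT (by name: the statement is the Claim_ definition above) =====
theorem steps_to_exit_spec : Claim_equal_steps_to_exit := by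
  intro r c dr dc _ hpre
  exact main_eq r c dr dc hpre
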